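-- pv_equiv track=rewrite | github.com/callmewenhao/leetcode | contests/biweekly-contest-98/T4.py | handleQuery
-- ===== SOURCE A (Python) =====
-- from typing import List
--
-- def handleQuery(nums1: List[int], nums2: List[int], queries: List[List[int]]) -> List[int]:
--
--     n = len(nums1)
--     cnt1 = [0] * (4 * n)  # 统计区间中 1 的个数
--     todo = [False] * (4 * n)  # lazy 数组
--
--     def maintain(o: int) -> None:
--         cnt1[o] = cnt1[o * 2] + cnt1[o * 2 + 1]
--
--     def build(o: int, l: int, r: int) -> None:
--         if l == r:
--             # 操作
--             cnt1[o] = nums1[l - 1]  # l 从 1 开始 故需要减 1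
--             return
--         m = l + (r - l) // 2
--         build(2 * o, l, m)
--         build(2 * o + 1, m + 1, r)
--         # 维护 额外的东西
--         maintain(o)
--
--     def do(o: int, l: int, r: int) -> None:
--         cnt1[o] = r - l + 1 - cnt1[o]
--         todo[o] = not todo[o]
--
--     # 更新 [L, R]
--     def update(o: int, l: int, r: int, L: int, R: int) -> None:
--         if L <= l and r <= R:
--             # 更新
--             do(o, l, r)
--             return
--
--         m = l + (r - l) // 2
--
--         # 需要继续递归 就把 to do [o] 的内容传下去（给左右儿子）
--         if todo[o]:
--             do(o * 2, l, m)
--             do(o * 2 + 1, m + 1, r)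
--             todo[o] = False  # 清空
--
--         if m >= L: update(o * 2, l, m, L, R)
--         if m < R: update(o * 2 + 1, m + 1, r, L, R)
--         # 维护
--         maintain(o)
--
--     build(1, 1, n)
--     ans = []
--     s = sum(nums2)
--     for op, l, r in queries:
--         if op == 1: update(1, 1, n, l + 1, r + 1)  # 前三个参数固定不变
--         elif op == 2: s += l * cnt1[1]
--         else: ans.append(s)
--     return ans
-- ===== SOURCE B (Python) =====
-- from typing import List
--
-- # Simpler re-implementation: keep the 0/1 array flat, flip ranges element-wise
-- # and maintain a running count of ones, instead of a lazy segment tree.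
-- def handleQuery(nums1: List[int], nums2: List[int], queries: List[List[int]]) -> List[int]:
--     arr = list(nums1)
--     ones = sum(arr)
--     s = sum(nums2)
--     ans = []
--     for op, l, r in queries:
--         if op == 1:
--             for i in range(l, r + 1):
--                 ones += 1 - 2 * arr[i]
--                 arr[i] = 1 - arr[i]
--         elif op == 2:
--             s += l * ones
--         else:
--             ans.append(s)
--     return ans
-- ===== Notes on version B (the rewrite author's own statement) =====
-- stated objective: simpler
-- what changed: Replaces the lazy segment tree (4n-node arrays, build/update recursion, lazy pushdown) with a flat copy of the array that is flipped element-wise per range query while a running ones-count is maintained.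
-- outside the precondition, e.g. on handleQuery([0, 1], [0], [[1, -1, 1], [2, 1, 0], [3, 0, 0]]): A returns [1], B returns [2]; on handleQuery([0, 1], [0], [[1, 2, 0], [2, 1, 0], [3, 0, 0]]): A returns [1], B returns [1]
import Mathlib
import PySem

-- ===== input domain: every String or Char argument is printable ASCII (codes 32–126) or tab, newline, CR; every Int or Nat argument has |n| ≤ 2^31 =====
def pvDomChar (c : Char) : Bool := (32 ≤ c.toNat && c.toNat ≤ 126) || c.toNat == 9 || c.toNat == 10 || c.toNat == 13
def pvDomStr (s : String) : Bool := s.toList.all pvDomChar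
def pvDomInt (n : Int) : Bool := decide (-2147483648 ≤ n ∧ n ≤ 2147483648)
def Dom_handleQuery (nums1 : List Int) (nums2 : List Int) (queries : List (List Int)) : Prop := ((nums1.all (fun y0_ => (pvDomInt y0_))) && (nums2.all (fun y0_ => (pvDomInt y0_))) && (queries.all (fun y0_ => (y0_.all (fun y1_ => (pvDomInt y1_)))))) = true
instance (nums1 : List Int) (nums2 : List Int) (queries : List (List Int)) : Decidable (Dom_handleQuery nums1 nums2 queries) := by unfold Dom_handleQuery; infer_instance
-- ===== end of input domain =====

-- B replaces A's lazy segment tree by a flat copy of the array, flipped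
-- element-wise per range query with a running ones-count (objective: simpler).
-- Neither Python mutates its arguments (B flips a local copy of nums1).

-- ===== PORT A =====
-- the two global arrays cnt1 / todo of A, modelled as functions Nat → value
structure PvSt where
  cnt : Nat → Int
  todo : Nat → Bool

def pvUpd (f : Nat → Int) (i : Nat) (v : Int) : Nat → Int := fun j => if j = i then v else f j
def pvUpdB (f : Nat → Bool) (i : Nat) (v : Bool) : Nat → Bool := fun j => if j = i then v else f j

-- maintain(o)
def pvMaintain (s : PvSt) (o : Nat) : PvSt :=
  { s with cnt := pvUpd s.cnt o (s.cnt (o * 2) + s.cnt (o * 2 + 1)) }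

-- do(o, l, r)
def pvDo (s : PvSt) (o l r : Nat) : PvSt :=
  { cnt := pvUpd s.cnt o ((r : Int) - (l : Int) + 1 - s.cnt o),
    todo := pvUpdB s.todo o (!s.todo o) }

-- build(o, l, r); fuel only makes the recursion total (Pre_ guarantees it suffices)
def pvBuild (nums1 : List Int) : Nat → Nat → Nat → Nat → PvSt → PvSt
  | 0, _, _, _, s => s
  | fuel + 1, o, l, r, s =>
    if l = r then { s with cnt := pvUpd s.cnt o (nums1.getD (l - 1) 0) }
    else
      let m := l + (r - l) / 2
      pvMaintain (pvBuild nums1 fuel (2 * o + 1) (m + 1) r (pvBuild nums1 fuel (2 * o) l m s)) o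

-- update(o, l, r, L, R); fuel only makes the recursion total
def pvUpdate : Nat → Nat → Nat → Nat → Nat → Nat → PvSt → PvSt
  | 0, _, _, _, _, _, s => s
  | fuel + 1, o, l, r, L, R, s =>
    if L ≤ l ∧ r ≤ R then pvDo s o l r
    else
      let m := l + (r - l) / 2
      let s1 := if s.todo o then
          let sb := pvDo (pvDo s (o * 2) l m) (o * 2 + 1) (m + 1) r
          { sb with todo := pvUpdB sb.todo o false }
        else s
      let s2 := if L ≤ m then pvUpdate fuel (o * 2) l m L R s1 else s1
      let s3 := if m < R then pvUpdate fuel (o * 2 + 1) (m + 1) r L R s2 else s2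
      pvMaintain s3 o

-- the query loop of A
def pvLoopA (n : Nat) : List (List Int) → List Int → Int → PvSt → List Int
  | [], ans, _, _ => ans
  | q :: qs, ans, s, st =>
    let op := q.getD 0 0
    let l := q.getD 1 0
    let r := q.getD 2 0
    if op = 1 then pvLoopA n qs ans s (pvUpdate (n + 1) 1 1 n (l + 1).toNat (r + 1).toNat st)
    else if op = 2 then pvLoopA n qs ans (s + l * st.cnt 1) st
    else pvLoopA n qs (ans ++ [s]) s st

def handleQuery (nums1 : List Int) (nums2 : List Int) (queries : List (List Int)) : List Int :=
  let n := nums1.length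
  pvLoopA n queries [] nums2.sum (pvBuild nums1 (n + 1) 1 1 n ⟨fun _ => 0, fun _ => false⟩)

-- ===== PORT B =====
-- the inner `for i in range(l, r+1)` flip loop of B
def pvFlipLoop : List Int → Int → List Nat → List Int × Int
  | arr, ones, [] => (arr, ones)
  | arr, ones, i :: is =>
    pvFlipLoop (arr.set i (1 - arr.getD i 0)) (ones + 1 - 2 * arr.getD i 0) is

-- the query loop of B
def pvLoopB : List (List Int) → List Int → Int → Int → List Int → List Int
  | [], ans, _, _, _ => ans
  | q :: qs, ans, s, ones, arr =>
    let op := q.getD 0 0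
    let l := q.getD 1 0
    let r := q.getD 2 0
    if op = 1 then
      let p := pvFlipLoop arr ones (List.range' l.toNat (r + 1 - l).toNat)
      pvLoopB qs ans s p.2 p.1
    else if op = 2 then pvLoopB qs ans (s + l * ones) ones arr
    else pvLoopB qs (ans ++ [s]) s ones arr

def handleQuery_alt (nums1 : List Int) (nums2 : List Int) (queries : List (List Int)) : List Int :=
  pvLoopB queries [] nums2.sum nums1.sum nums1

-- ===== PRECONDITION & SPEC =====
-- Pre_ restricts to the task's natural domain: nonempty nums1, queries of length 3,
-- and flip queries (op = 1) with both endpoints in [0, n).  Outside it A raises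
-- (RecursionError / IndexError / ValueError on unpacking) except for a few
-- out-of-range flips that either happen to cover the whole root segment (B would
-- then use Python negative-index wraparound) or happen to terminate as no-ops
-- (on those A and B agree); A's behaviour there is accidental, so it is not claimed.
def Pre_handleQuery (nums1 : List Int) (nums2 : List Int) (queries : List (List Int)) : Prop :=
  nums1 ≠ [] ∧ ∀ q ∈ queries, q.length = 3 ∧
    (q.getD 0 0 = 1 → 0 ≤ q.getD 1 0 ∧ q.getD 1 0 < (nums1.length : Int) ∧
      0 ≤ q.getD 2 0 ∧ q.getD 2 0 < (nums1.length : Int))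
instance (nums1 : List Int) (nums2 : List Int) (queries : List (List Int)) : Decidable (Pre_handleQuery nums1 nums2 queries) := by unfold Pre_handleQuery; infer_instance

def pvWitness_handleQuery : List Int × List Int × List (List Int) :=
  ([1, 0, 1], [5, 3], [[1, 0, 1], [2, 2, 0], [3, 0, 0]])

def Spec_handleQuery (nums1 : List Int) (nums2 : List Int) (queries : List (List Int)) (out : List Int) : Prop := out = handleQuery_alt nums1 nums2 queries
instance (nums1 : List Int) (nums2 : List Int) (queries : List (List Int)) (out : List Int) : Decidable (Spec_handleQuery nums1 nums2 queries out) := by unfold Spec_handleQuery; infer_instance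

-- ===== CLAIM (what is proved, stated in full; the proofs are below) =====
def Claim_equal_handleQuery : Prop := ∀ (nums1 : List Int) (nums2 : List Int) (queries : List (List Int)), Dom_handleQuery nums1 nums2 queries → Pre_handleQuery nums1 nums2 queries → Spec_handleQuery nums1 nums2 queries (handleQuery nums1 nums2 queries)

-- ===== LEMMAS AND PROOFS =====

-- i lies in the subtree of heap index o
def pvIn (o i : Nat) : Prop := ∃ k, i / 2 ^ k = o

-- the virtual 0/1 array represented by the subtree of (o, [l,r])
def pvDecode : Nat → PvSt → Nat → Nat → Nat → List Int
  | 0, _, _, _, _ => []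
  | fuel + 1, s, o, l, r =>
    if l = r then [s.cnt o]
    else
      let m := l + (r - l) / 2
      let d := pvDecode fuel s (o * 2) l m ++ pvDecode fuel s (o * 2 + 1) (m + 1) r
      if s.todo o then d.map (fun x => 1 - x) else d

-- invariant: every node's cnt equals the sum of its decoded segment
def pvCntOK : Nat → PvSt → Nat → Nat → Nat → Prop
  | 0, _, _, _, _ => True
  | fuel + 1, s, o, l, r =>
    s.cnt o = (pvDecode (fuel + 1) s o l r).sum ∧
    (l = r ∨ (pvCntOK fuel s (o * 2) l (l + (r - l) / 2) ∧
              pvCntOK fuel s (o * 2 + 1) (l + (r - l) / 2 + 1) r))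

-- flip the entries of d (whose positions are l, l+1, …) lying in [L, R]
def pvFlipIn (l L R : Nat) (d : List Int) : List Int :=
  d.mapIdx (fun j x => if L ≤ l + j ∧ l + j ≤ R then 1 - x else x)

def pvAgr (o : Nat) (s s' : PvSt) : Prop :=
  ∀ i, pvIn o i → s.cnt i = s'.cnt i ∧ s.todo i = s'.todo i

theorem pvIn_self (o : Nat) : pvIn o o := ⟨0, by simp⟩

theorem pvIn_ge {o i : Nat} (h : pvIn o i) : o ≤ i := by
  obtain ⟨k, rfl⟩ := h
  exact Nat.div_le_self _ _

theorem pvIn_left {o i : Nat} (h : pvIn (o * 2) i) : pvIn o i := by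
  obtain ⟨k, hk⟩ := h
  exact ⟨k + 1, by rw [pow_succ, ← Nat.div_div_eq_div_mul, hk]; omega⟩

theorem pvIn_right {o i : Nat} (h : pvIn (o * 2 + 1) i) : pvIn o i := by
  obtain ⟨k, hk⟩ := h
  exact ⟨k + 1, by rw [pow_succ, ← Nat.div_div_eq_div_mul, hk]; omega⟩

theorem pvIn_not_left_self {o : Nat} (ho : 1 ≤ o) : ¬ pvIn (o * 2) o :=
  fun h => absurd (pvIn_ge h) (by omega)

theorem pvIn_not_right_self {o : Nat} (ho : 1 ≤ o) : ¬ pvIn (o * 2 + 1) o :=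
  fun h => absurd (pvIn_ge h) (by omega)

theorem pvIn_disj {o i : Nat} (ho : 1 ≤ o) (hl : pvIn (o * 2) i) (hr : pvIn (o * 2 + 1) i) : False := by
  obtain ⟨a, ha⟩ := hl
  obtain ⟨b, hb⟩ := hr
  rcases Nat.le_total a b with hab | hab
  · have hpow : (2:Nat) ^ b = 2 ^ a * 2 ^ (b - a) := by rw [← pow_add]; congr 1; omega
    have : i / 2 ^ b = (o * 2) / 2 ^ (b - a) := by
      rw [hpow, ← Nat.div_div_eq_div_mul, ha]
    rcases Nat.eq_or_lt_of_le hab with rfl | hlt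
    · simp at this; omega
    · have h2 : (o * 2) / 2 ^ (b - a) ≤ (o * 2) / 2 := by
        apply Nat.div_le_div_left
        · calc (2:Nat) = 2 ^ 1 := by norm_num
            _ ≤ 2 ^ (b - a) := Nat.pow_le_pow_right (by norm_num) (by omega)
        · norm_num
      omega
  · have hpow : (2:Nat) ^ a = 2 ^ b * 2 ^ (a - b) := by rw [← pow_add]; congr 1; omega
    have : i / 2 ^ a = (o * 2 + 1) / 2 ^ (a - b) := by
      rw [hpow, ← Nat.div_div_eq_div_mul, hb]
    rcases Nat.eq_or_lt_of_le hab with rfl | hlt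
    · simp at this; omega
    · have h2 : (o * 2 + 1) / 2 ^ (a - b) ≤ (o * 2 + 1) / 2 := by
        apply Nat.div_le_div_left
        · calc (2:Nat) = 2 ^ 1 := by norm_num
            _ ≤ 2 ^ (a - b) := Nat.pow_le_pow_right (by norm_num) (by omega)
        · norm_num
      have h3 : (o * 2 + 1) / 2 = o := by omega
      omega

theorem pvAgr_left {o : Nat} {s s' : PvSt} (h : pvAgr o s s') : pvAgr (o * 2) s s' :=
  fun i hi => h i (pvIn_left hi)

theorem pvAgr_right {o : Nat} {s s' : PvSt} (h : pvAgr o s s') : pvAgr (o * 2 + 1) s s' :=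
  fun i hi => h i (pvIn_right hi)

theorem pvDecode_congr : ∀ (fuel : Nat) (s s' : PvSt) (o l r : Nat), pvAgr o s s' →
    pvDecode fuel s o l r = pvDecode fuel s' o l r := by
  intro fuel
  induction fuel with
  | zero => intro s s' o l r _; rfl
  | succ fuel ih =>
    intro s s' o l r h
    have ho := h o (pvIn_self o)
    simp only [pvDecode, ho.1, ho.2, ih s s' (o * 2) _ _ (pvAgr_left h),
      ih s s' (o * 2 + 1) _ _ (pvAgr_right h)]

theorem pvCntOK_congr : ∀ (fuel : Nat) (s s' : PvSt) (o l r : Nat), pvAgr o s s' →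
    pvCntOK fuel s o l r → pvCntOK fuel s' o l r := by
  intro fuel
  induction fuel with
  | zero => intro _ _ _ _ _ _ h; exact h
  | succ fuel ih =>
    intro s s' o l r h hc
    have ho := h o (pvIn_self o)
    refine ⟨?_, ?_⟩
    · rw [← ho.1, ← pvDecode_congr (fuel + 1) s s' o l r h]; exact hc.1
    · rcases hc.2 with h1 | ⟨h1, h2⟩
      · exact Or.inl h1
      · exact Or.inr ⟨ih s s' _ _ _ (pvAgr_left h) h1, ih s s' _ _ _ (pvAgr_right h) h2⟩

theorem pvDecode_length : ∀ (fuel : Nat) (s : PvSt) (o l r : Nat), l ≤ r → r - l < fuel →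
    (pvDecode fuel s o l r).length = r - l + 1 := by
  intro fuel
  induction fuel with
  | zero => intro s o l r h1 h2; omega
  | succ fuel ih =>
    intro s o l r h1 h2
    by_cases hlr : l = r
    · simp [pvDecode, hlr]
    · have hm : l + (r - l) / 2 < r ∧ l ≤ l + (r - l) / 2 := by omega
      simp only [pvDecode, if_neg hlr]
      have hL := ih s (o * 2) l (l + (r - l) / 2) (by omega) (by omega)
      have hR := ih s (o * 2 + 1) (l + (r - l) / 2 + 1) r (by omega) (by omega)
      by_cases ht : s.todo o <;> simp [ht, hL, hR] <;> omega

theorem pvSum_map_sub (d : List Int) : (d.map (fun x => 1 - x)).sum = d.length - d.sum := by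
  induction d with
  | nil => simp
  | cons x xs ih => simp [ih]; ring

theorem pvDo_agr_out {s : PvSt} {o l r : Nat} {i : Nat} (h : i ≠ o) :
    (pvDo s o l r).cnt i = s.cnt i ∧ (pvDo s o l r).todo i = s.todo i := by
  simp [pvDo, pvUpd, pvUpdB, h]

theorem pvAgr_symm {p : Nat} {s s' : PvSt} (h : pvAgr p s s') : pvAgr p s' s :=
  fun i hi => ⟨(h i hi).1.symm, (h i hi).2.symm⟩

theorem pvAgr_do_out {p o l r : Nat} {s : PvSt} (h : ¬ pvIn p o) : pvAgr p s (pvDo s o l r) :=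
  fun i hi => by
    have hne : i ≠ o := fun he => h (he ▸ hi)
    exact ⟨(pvDo_agr_out hne).1.symm, (pvDo_agr_out hne).2.symm⟩

theorem pvDo_decode : ∀ (fuel : Nat) (s : PvSt) (o l r : Nat), 1 ≤ o → l ≤ r → r - l < fuel →
    pvDecode fuel (pvDo s o l r) o l r = (pvDecode fuel s o l r).map (fun x => 1 - x) := by
  intro fuel s o l r ho hlr hf
  match fuel with
  | 0 => omega
  | f + 1 =>
    by_cases h : l = r
    · subst h
      simp [pvDecode, pvDo, pvUpd]
    · have hAl : pvAgr (o * 2) (pvDo s o l r) s :=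
        pvAgr_symm (pvAgr_do_out (pvIn_not_left_self ho))
      have hAr : pvAgr (o * 2 + 1) (pvDo s o l r) s :=
        pvAgr_symm (pvAgr_do_out (pvIn_not_right_self ho))
      have ht : (pvDo s o l r).todo o = !s.todo o := by simp [pvDo, pvUpdB]
      simp only [pvDecode, if_neg h]
      rw [pvDecode_congr f _ s (o * 2) l _ hAl, pvDecode_congr f _ s (o * 2 + 1) _ r hAr, ht]
      cases hts : s.todo o
      · simp
      · simp [List.map_map]

theorem pvDo_cntok : ∀ (fuel : Nat) (s : PvSt) (o l r : Nat), 1 ≤ o → l ≤ r → r - l < fuel →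
    pvCntOK fuel s o l r → pvCntOK fuel (pvDo s o l r) o l r := by
  intro fuel s o l r ho hlr hf hc
  match fuel, hf, hc with
  | f + 1, hf, hc =>
    constructor
    · rw [pvDo_decode (f + 1) s o l r ho hlr hf, pvSum_map_sub,
        pvDecode_length (f + 1) s o l r hlr hf, ← hc.1]
      have hcast : ((r - l + 1 : Nat) : Int) = (r : Int) - (l : Int) + 1 := by omega
      simp [pvDo, pvUpd, hcast]
    · rcases hc.2 with h1 | ⟨h1, h2⟩
      · exact Or.inl h1
      · exact Or.inr ⟨pvCntOK_congr f s _ _ _ _ (pvAgr_do_out (pvIn_not_left_self ho)) h1,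
          pvCntOK_congr f s _ _ _ _ (pvAgr_do_out (pvIn_not_right_self ho)) h2⟩

theorem pvAgr_maintain_out {p o : Nat} {s : PvSt} (h : ¬ pvIn p o) : pvAgr p s (pvMaintain s o) :=
  fun i hi => by
    have hne : i ≠ o := fun he => h (he ▸ hi)
    exact ⟨by simp [pvMaintain, pvUpd, hne], rfl⟩

theorem pvAgr_of_frame {p q : Nat} {s s' : PvSt}
    (hf : ∀ i, ¬ pvIn q i → s'.cnt i = s.cnt i ∧ s'.todo i = s.todo i)
    (hd : ∀ i, pvIn p i → ¬ pvIn q i) : pvAgr p s s' :=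
  fun i hi => ⟨(hf i (hd i hi)).1.symm, (hf i (hd i hi)).2.symm⟩

theorem pvRange'_split (l m r : Nat) (h1 : l ≤ m) (h2 : m < r) :
    List.range' l (r - l + 1) = List.range' l (m - l + 1) ++ List.range' (m + 1) (r - m) := by
  have h := List.range'_append (s := l) (m := m - l + 1) (n := r - m) (step := 1)
  rw [show l + 1 * (m - l + 1) = m + 1 by omega] at h
  rw [show r - l + 1 = (m - l + 1) + (r - m) by omega]
  exact h.symm

theorem pvCntOK_cnt {fuel : Nat} {s : PvSt} {o l r : Nat} (hf : 0 < fuel)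
    (hc : pvCntOK fuel s o l r) : s.cnt o = (pvDecode fuel s o l r).sum := by
  match fuel, hc with
  | f + 1, hc => exact hc.1

theorem pvCntOK_children {fuel : Nat} {s : PvSt} {o l r : Nat}
    (hc : pvCntOK (fuel + 1) s o l r) (h : l ≠ r) :
    pvCntOK fuel s (o * 2) l (l + (r - l) / 2) ∧
    pvCntOK fuel s (o * 2 + 1) (l + (r - l) / 2 + 1) r := hc.2.resolve_left h

theorem pvBuild_ok (nums1 : List Int) : ∀ (fuel o l r : Nat) (s : PvSt), 1 ≤ o → l ≤ r → r - l < fuel →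
    (pvBuild nums1 fuel o l r s).todo = s.todo ∧
    (∀ i, ¬ pvIn o i → (pvBuild nums1 fuel o l r s).cnt i = s.cnt i) ∧
    ((∀ i, s.todo i = false) →
      pvDecode fuel (pvBuild nums1 fuel o l r s) o l r
        = (List.range' l (r - l + 1)).map (fun i => nums1.getD (i - 1) 0) ∧
      pvCntOK fuel (pvBuild nums1 fuel o l r s) o l r) := by
  intro fuel
  induction fuel with
  | zero => intro o l r s _ _ hf; omega
  | succ fuel ih =>
    intro o l r s ho hlr hf
    by_cases h : l = r
    · subst h
      have hres : pvBuild nums1 (fuel + 1) o l l s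
          = { s with cnt := pvUpd s.cnt o (nums1.getD (l - 1) 0) } := by
        simp [pvBuild]
      refine ⟨by rw [hres], ?_, ?_⟩
      · intro i hi
        have hio : i ≠ o := fun he => hi (he ▸ pvIn_self o)
        rw [hres]; simp [pvUpd, hio]
      · intro _
        constructor
        · rw [hres, show l - l + 1 = 1 by omega]
          simp [pvDecode, pvUpd, List.range']
        · exact ⟨by rw [hres]; simp [pvDecode, pvUpd], Or.inl rfl⟩
    · have ho2 : 2 * o = o * 2 := Nat.mul_comm 2 o
      set m := l + (r - l) / 2 with hm
      have hlm : l ≤ m := by omega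
      have hmr : m < r := by omega
      have hres : pvBuild nums1 (fuel + 1) o l r s
          = pvMaintain (pvBuild nums1 fuel (o * 2 + 1) (m + 1) r
              (pvBuild nums1 fuel (o * 2) l m s)) o := by
        simp only [pvBuild]
        rw [if_neg h, ho2, ← hm]
      have ihL := ih (o * 2) l m s (by omega) hlm (by omega)
      have ihR := ih (o * 2 + 1) (m + 1) r (pvBuild nums1 fuel (o * 2) l m s)
        (by omega) (by omega) (by omega)
      set s1 := pvBuild nums1 fuel (o * 2) l m s with hs1
      set s2 := pvBuild nums1 fuel (o * 2 + 1) (m + 1) r s1 with hs2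
      obtain ⟨tL, fL, dcL⟩ := ihL
      obtain ⟨tR, fR, dcR⟩ := ihR
      rw [hres]
      refine ⟨?_, ?_, ?_⟩
      · calc (pvMaintain s2 o).todo = s2.todo := rfl
          _ = s1.todo := tR
          _ = s.todo := tL
      · intro i hi
        have hio : i ≠ o := fun he => hi (he ▸ pvIn_self o)
        have h1 : (pvMaintain s2 o).cnt i = s2.cnt i := by simp [pvMaintain, pvUpd, hio]
        rw [h1, fR i (fun hr => hi (pvIn_right hr)), fL i (fun hl => hi (pvIn_left hl))]
      · intro hts
        have hts1 : ∀ i, s1.todo i = false := fun i => by rw [tL]; exact hts i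
        obtain ⟨dL, cL⟩ := dcL hts
        obtain ⟨dR, cR⟩ := dcR hts1
        rw [show r - (m + 1) + 1 = r - m by omega] at dR
        have aL2 : pvAgr (o * 2) s1 s2 :=
          pvAgr_of_frame (fun i hi => ⟨fR i hi, by rw [tR]⟩)
            (fun i hi hr => pvIn_disj ho hi hr)
        have aLm : pvAgr (o * 2) s2 (pvMaintain s2 o) := pvAgr_maintain_out (pvIn_not_left_self ho)
        have aRm : pvAgr (o * 2 + 1) s2 (pvMaintain s2 o) := pvAgr_maintain_out (pvIn_not_right_self ho)
        have dL2 : pvDecode fuel (pvMaintain s2 o) (o * 2) l m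
            = (List.range' l (m - l + 1)).map (fun i => nums1.getD (i - 1) 0) := by
          rw [← pvDecode_congr fuel s2 _ (o * 2) l m aLm,
            ← pvDecode_congr fuel s1 s2 (o * 2) l m aL2]
          exact dL
        have dR2 : pvDecode fuel (pvMaintain s2 o) (o * 2 + 1) (m + 1) r
            = (List.range' (m + 1) (r - m)).map (fun i => nums1.getD (i - 1) 0) := by
          rw [← pvDecode_congr fuel s2 _ _ _ _ aRm]
          exact dR
        have htodo : (pvMaintain s2 o).todo o = false := by
          show s2.todo o = false
          rw [tR, tL]; exact hts o
        have hdec : pvDecode (fuel + 1) (pvMaintain s2 o) o l r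
            = (List.range' l (r - l + 1)).map (fun i => nums1.getD (i - 1) 0) := by
          simp only [pvDecode]
          rw [if_neg h, ← hm, htodo]
          simp only [Bool.false_eq_true, if_false]
          rw [dL2, dR2, pvRange'_split l m r hlm hmr, List.map_append]
        refine ⟨hdec, ?_, Or.inr ⟨?_, ?_⟩⟩
        · have e1 : s2.cnt (o * 2) = ((List.range' l (m - l + 1)).map (fun i => nums1.getD (i - 1) 0)).sum := by
            rw [fR (o * 2) (fun hr => pvIn_disj ho (pvIn_self (o * 2)) hr),
              pvCntOK_cnt (by omega) cL, dL]
          have e2 : s2.cnt (o * 2 + 1) = ((List.range' (m + 1) (r - m)).map (fun i => nums1.getD (i - 1) 0)).sum := by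
            rw [pvCntOK_cnt (by omega) cR, dR]
          have hcnt : (pvMaintain s2 o).cnt o = s2.cnt (o * 2) + s2.cnt (o * 2 + 1) := by
            simp [pvMaintain, pvUpd]
          rw [hcnt, hdec, pvRange'_split l m r hlm hmr, List.map_append, List.sum_append, e1, e2]
        · rw [← hm]
          exact pvCntOK_congr fuel s2 _ _ _ _ aLm (pvCntOK_congr fuel s1 s2 _ _ _ aL2 cL)
        · rw [← hm]
          exact pvCntOK_congr fuel s2 _ _ _ _ aRm cR

theorem pvFlipIn_all {l L R : Nat} {d : List Int} (h : ∀ j, j < d.length → L ≤ l + j ∧ l + j ≤ R) :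
    pvFlipIn l L R d = d.map (fun x => 1 - x) := by
  unfold pvFlipIn
  apply List.ext_getElem (by simp)
  intro j h1 h2
  simp only [List.getElem_mapIdx, List.getElem_map]
  rw [if_pos (h j (by simpa using h1))]

theorem pvFlipIn_none {l L R : Nat} {d : List Int} (h : ∀ j, j < d.length → ¬(L ≤ l + j ∧ l + j ≤ R)) :
    pvFlipIn l L R d = d := by
  unfold pvFlipIn
  apply List.ext_getElem (by simp)
  intro j h1 h2
  simp only [List.getElem_mapIdx]
  rw [if_neg (h j (by simpa using h1))]

theorem pvFlipIn_append (l L R : Nat) (d1 d2 : List Int) :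
    pvFlipIn l L R (d1 ++ d2) = pvFlipIn l L R d1 ++ pvFlipIn (l + d1.length) L R d2 := by
  unfold pvFlipIn
  rw [List.mapIdx_append]
  congr 1
  congr 1
  funext j x
  rw [show l + (j + d1.length) = l + d1.length + j by omega]

theorem pvIn_cl (o : Nat) : pvIn o (o * 2) := ⟨1, by rw [pow_one]; omega⟩
theorem pvIn_cr (o : Nat) : pvIn o (o * 2 + 1) := ⟨1, by rw [pow_one]; omega⟩

theorem pvDecode_node {fuel : Nat} {s : PvSt} {o l r : Nat} (h : l ≠ r) (ht : s.todo o = false) :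
    pvDecode (fuel + 1) s o l r
      = pvDecode fuel s (o * 2) l (l + (r - l) / 2)
        ++ pvDecode fuel s (o * 2 + 1) (l + (r - l) / 2 + 1) r := by
  simp only [pvDecode]
  rw [if_neg h, ht]
  simp

theorem pvDecode_node_t {fuel : Nat} {s : PvSt} {o l r : Nat} (h : l ≠ r) (ht : s.todo o = true) :
    pvDecode (fuel + 1) s o l r
      = (pvDecode fuel s (o * 2) l (l + (r - l) / 2)
        ++ pvDecode fuel s (o * 2 + 1) (l + (r - l) / 2 + 1) r).map (fun x => 1 - x) := by
  simp only [pvDecode]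
  rw [if_neg h, ht]
  simp

theorem pvCntOK_mk {fuel : Nat} {s : PvSt} {o l r : Nat}
    (h1 : s.cnt o = (pvDecode (fuel + 1) s o l r).sum)
    (h2 : l = r ∨ (pvCntOK fuel s (o * 2) l (l + (r - l) / 2) ∧
                   pvCntOK fuel s (o * 2 + 1) (l + (r - l) / 2 + 1) r)) :
    pvCntOK (fuel + 1) s o l r := ⟨h1, h2⟩

theorem pvUpdate_ok : ∀ (fuel o l r L R : Nat) (s : PvSt), 1 ≤ o → l ≤ r → r - l < fuel →
    L ≤ r → l ≤ R → pvCntOK fuel s o l r →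
    (∀ i, ¬ pvIn o i → (pvUpdate fuel o l r L R s).cnt i = s.cnt i ∧
                       (pvUpdate fuel o l r L R s).todo i = s.todo i) ∧
    pvDecode fuel (pvUpdate fuel o l r L R s) o l r = pvFlipIn l L R (pvDecode fuel s o l r) ∧
    pvCntOK fuel (pvUpdate fuel o l r L R s) o l r := by
  intro fuel
  induction fuel with
  | zero => intro o l r L R s _ _ hf; omega
  | succ fuel ih =>
    intro o l r L R s ho hlr hf hLr hlR hc
    by_cases hcov : L ≤ l ∧ r ≤ R
    · have hres : pvUpdate (fuel + 1) o l r L R s = pvDo s o l r := by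
        simp [pvUpdate, hcov]
      rw [hres]
      refine ⟨?_, ?_, pvDo_cntok (fuel + 1) s o l r ho hlr hf hc⟩
      · intro i hi
        exact pvDo_agr_out (fun he => hi (he ▸ pvIn_self o))
      · rw [pvDo_decode (fuel + 1) s o l r ho hlr hf]
        exact (pvFlipIn_all (by rw [pvDecode_length _ _ _ _ _ hlr hf]; intro j hj; omega)).symm
    · have hne : l ≠ r := fun he => hcov (by omega)
      have hfp : 0 < fuel := by omega
      set m := l + (r - l) / 2 with hm
      have hlm : l ≤ m := by omega
      have hmr : m < r := by omega
      obtain ⟨cL, cR⟩ := pvCntOK_children hc hne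
      rw [← hm] at cL cR
      -- distinctness facts
      have hnl : ¬ pvIn (o * 2) o := pvIn_not_left_self ho
      have hnr : ¬ pvIn (o * 2 + 1) o := pvIn_not_right_self ho
      have hnlr : ¬ pvIn (o * 2) (o * 2 + 1) :=
        fun hl => pvIn_disj ho hl (pvIn_self _)
      have hnrl : ¬ pvIn (o * 2 + 1) (o * 2) :=
        fun hr => pvIn_disj ho (pvIn_self _) hr
      -- the push step
      set sb := pvDo (pvDo s (o * 2) l m) (o * 2 + 1) (m + 1) r with hsb
      set s1 := if s.todo o = true then { sb with todo := pvUpdB sb.todo o false } else s with hs1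
      have A5 : ∀ i, ¬ pvIn o i → s1.cnt i = s.cnt i ∧ s1.todo i = s.todo i := by
        intro i hi
        have hio : i ≠ o := fun he => hi (he ▸ pvIn_self o)
        have hil : i ≠ o * 2 := fun he => hi (he ▸ pvIn_cl o)
        have hir : i ≠ o * 2 + 1 := fun he => hi (he ▸ pvIn_cr o)
        rw [hs1]
        by_cases hts : s.todo o = true
        · rw [if_pos hts, hsb]
          simp [pvDo, pvUpd, pvUpdB, hio, hil, hir]
        · rw [if_neg hts]
          exact ⟨rfl, rfl⟩
      have A3 : s1.todo o = false := by
        rw [hs1]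
        by_cases hts : s.todo o = true
        · rw [if_pos hts]; simp [pvUpdB]
        · rw [if_neg hts]; simpa using hts
      have A1 : pvCntOK fuel s1 (o * 2) l m := by
        rw [hs1]
        by_cases hts : s.todo o = true
        · rw [if_pos hts]
          have c1 : pvCntOK fuel (pvDo s (o * 2) l m) (o * 2) l m :=
            pvDo_cntok fuel s (o * 2) l m (by omega) hlm (by omega) cL
          have c2 : pvCntOK fuel sb (o * 2) l m := by
            rw [hsb]
            exact pvCntOK_congr fuel _ _ _ _ _ (pvAgr_do_out hnlr) c1
          exact pvCntOK_congr fuel sb _ _ _ _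
            (fun i hi => ⟨rfl, by have hio : i ≠ o := fun he => hnl (he ▸ hi); simp [pvUpdB, hio]⟩) c2
        · rw [if_neg hts]; exact cL
      have A2 : pvCntOK fuel s1 (o * 2 + 1) (m + 1) r := by
        rw [hs1]
        by_cases hts : s.todo o = true
        · rw [if_pos hts]
          have c0 : pvCntOK fuel (pvDo s (o * 2) l m) (o * 2 + 1) (m + 1) r :=
            pvCntOK_congr fuel s _ _ _ _ (pvAgr_do_out hnrl) cR
          have c1 : pvCntOK fuel sb (o * 2 + 1) (m + 1) r := by
            rw [hsb]
            exact pvDo_cntok fuel _ (o * 2 + 1) (m + 1) r (by omega) (by omega) (by omega) c0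
          exact pvCntOK_congr fuel sb _ _ _ _
            (fun i hi => ⟨rfl, by have hio : i ≠ o := fun he => hnr (he ▸ hi); simp [pvUpdB, hio]⟩) c1
        · rw [if_neg hts]; exact cR
      have A4 : pvDecode fuel s1 (o * 2) l m ++ pvDecode fuel s1 (o * 2 + 1) (m + 1) r
          = pvDecode (fuel + 1) s o l r := by
        rw [hs1]
        by_cases hts : s.todo o = true
        · rw [if_pos hts, pvDecode_node_t hne hts, ← hm, List.map_append]
          have a1 : pvAgr (o * 2) { sb with todo := pvUpdB sb.todo o false } sb :=
            fun i hi => ⟨rfl, by have hio : i ≠ o := fun he => hnl (he ▸ hi); simp [pvUpdB, hio]⟩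
          have a2 : pvAgr (o * 2) sb (pvDo s (o * 2) l m) := by
            rw [hsb]
            exact pvAgr_symm (pvAgr_do_out hnlr)
          have el : pvDecode fuel { sb with todo := pvUpdB sb.todo o false } (o * 2) l m
              = (pvDecode fuel s (o * 2) l m).map (fun x => 1 - x) := by
            rw [pvDecode_congr fuel _ sb (o * 2) l m a1, pvDecode_congr fuel sb _ (o * 2) l m a2]
            exact pvDo_decode fuel s (o * 2) l m (by omega) hlm (by omega)
          have b1 : pvAgr (o * 2 + 1) { sb with todo := pvUpdB sb.todo o false } sb :=
            fun i hi => ⟨rfl, by have hio : i ≠ o := fun he => hnr (he ▸ hi); simp [pvUpdB, hio]⟩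
          have er : pvDecode fuel { sb with todo := pvUpdB sb.todo o false } (o * 2 + 1) (m + 1) r
              = (pvDecode fuel s (o * 2 + 1) (m + 1) r).map (fun x => 1 - x) := by
            rw [pvDecode_congr fuel _ sb (o * 2 + 1) (m + 1) r b1, hsb,
              pvDo_decode fuel _ (o * 2 + 1) (m + 1) r (by omega) (by omega) (by omega),
              pvDecode_congr fuel (pvDo s (o * 2) l m) s (o * 2 + 1) (m + 1) r
                (pvAgr_symm (pvAgr_do_out hnrl))]
          rw [el, er]
        · rw [if_neg hts, pvDecode_node hne (by simpa using hts), ← hm]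
      -- recurse left
      set s2 := if L ≤ m then pvUpdate fuel (o * 2) l m L R s1 else s1 with hs2
      have hlenL : (pvDecode fuel s1 (o * 2) l m).length = m - l + 1 :=
        pvDecode_length fuel s1 (o * 2) l m hlm (by omega)
      have B3 : ∀ i, ¬ pvIn (o * 2) i → s2.cnt i = s1.cnt i ∧ s2.todo i = s1.todo i := by
        rw [hs2]
        by_cases hLm : L ≤ m
        · rw [if_pos hLm]
          exact (ih (o * 2) l m L R s1 (by omega) hlm (by omega) hLm (by omega) A1).1
        · rw [if_neg hLm]; exact fun i _ => ⟨rfl, rfl⟩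
      have B1 : pvDecode fuel s2 (o * 2) l m = pvFlipIn l L R (pvDecode fuel s1 (o * 2) l m) := by
        rw [hs2]
        by_cases hLm : L ≤ m
        · rw [if_pos hLm]
          exact (ih (o * 2) l m L R s1 (by omega) hlm (by omega) hLm (by omega) A1).2.1
        · rw [if_neg hLm, pvFlipIn_none (by rw [hlenL]; intro j hj; omega)]
      have B2 : pvCntOK fuel s2 (o * 2) l m := by
        rw [hs2]
        by_cases hLm : L ≤ m
        · rw [if_pos hLm]
          exact (ih (o * 2) l m L R s1 (by omega) hlm (by omega) hLm (by omega) A1).2.2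
        · rw [if_neg hLm]; exact A1
      have B2r : pvCntOK fuel s2 (o * 2 + 1) (m + 1) r :=
        pvCntOK_congr fuel s1 s2 _ _ _
          (pvAgr_of_frame B3 (fun i hi hl => pvIn_disj ho hl hi)) A2
      have B1r : pvDecode fuel s2 (o * 2 + 1) (m + 1) r = pvDecode fuel s1 (o * 2 + 1) (m + 1) r :=
        (pvDecode_congr fuel s1 s2 _ _ _
          (pvAgr_of_frame B3 (fun i hi hl => pvIn_disj ho hl hi))).symm
      -- recurse right
      set s3 := if m < R then pvUpdate fuel (o * 2 + 1) (m + 1) r L R s2 else s2 with hs3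
      have hlenR : (pvDecode fuel s2 (o * 2 + 1) (m + 1) r).length = r - (m + 1) + 1 :=
        pvDecode_length fuel s2 (o * 2 + 1) (m + 1) r (by omega) (by omega)
      have C3 : ∀ i, ¬ pvIn (o * 2 + 1) i → s3.cnt i = s2.cnt i ∧ s3.todo i = s2.todo i := by
        rw [hs3]
        by_cases hmR : m < R
        · rw [if_pos hmR]
          exact (ih (o * 2 + 1) (m + 1) r L R s2 (by omega) (by omega) (by omega) hLr (by omega) B2r).1
        · rw [if_neg hmR]; exact fun i _ => ⟨rfl, rfl⟩
      have C1 : pvDecode fuel s3 (o * 2 + 1) (m + 1) r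
          = pvFlipIn (m + 1) L R (pvDecode fuel s2 (o * 2 + 1) (m + 1) r) := by
        rw [hs3]
        by_cases hmR : m < R
        · rw [if_pos hmR]
          exact (ih (o * 2 + 1) (m + 1) r L R s2 (by omega) (by omega) (by omega) hLr (by omega) B2r).2.1
        · rw [if_neg hmR, pvFlipIn_none (by rw [hlenR]; intro j hj; omega)]
      have C2 : pvCntOK fuel s3 (o * 2 + 1) (m + 1) r := by
        rw [hs3]
        by_cases hmR : m < R
        · rw [if_pos hmR]
          exact (ih (o * 2 + 1) (m + 1) r L R s2 (by omega) (by omega) (by omega) hLr (by omega) B2r).2.2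
        · rw [if_neg hmR]; exact B2r
      have aC : pvAgr (o * 2) s2 s3 :=
        pvAgr_of_frame C3 (fun i hi hr => pvIn_disj ho hi hr)
      have C2l : pvCntOK fuel s3 (o * 2) l m := pvCntOK_congr fuel s2 s3 _ _ _ aC B2
      have C1l : pvDecode fuel s3 (o * 2) l m = pvDecode fuel s2 (o * 2) l m :=
        (pvDecode_congr fuel s2 s3 _ _ _ aC).symm
      have htodo3 : s3.todo o = false := by
        rw [(C3 o hnr).2, (B3 o hnl).2, A3]
      -- unfold result
      have hres : pvUpdate (fuel + 1) o l r L R s = pvMaintain s3 o := by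
        simp only [pvUpdate]
        rw [if_neg hcov, ← hm, ← hsb, ← hs1, ← hs2, ← hs3]
      rw [hres]
      have aML : pvAgr (o * 2) s3 (pvMaintain s3 o) := pvAgr_maintain_out hnl
      have aMR : pvAgr (o * 2 + 1) s3 (pvMaintain s3 o) := pvAgr_maintain_out hnr
      have hdec2 : pvDecode (fuel + 1) (pvMaintain s3 o) o l r
          = pvDecode fuel s3 (o * 2) l m ++ pvDecode fuel s3 (o * 2 + 1) (m + 1) r := by
        rw [pvDecode_node hne (show (pvMaintain s3 o).todo o = false from htodo3), ← hm,
          ← pvDecode_congr fuel s3 _ (o * 2) l m aML,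
          ← pvDecode_congr fuel s3 _ (o * 2 + 1) (m + 1) r aMR]
      have hdec : pvDecode (fuel + 1) (pvMaintain s3 o) o l r
          = pvFlipIn l L R (pvDecode (fuel + 1) s o l r) := by
        rw [hdec2, C1l, B1, C1, B1r, ← A4, pvFlipIn_append, hlenL,
          show l + (m - l + 1) = m + 1 by omega]
      refine ⟨?_, hdec, pvCntOK_mk ?_ (Or.inr ⟨?_, ?_⟩)⟩
      · intro i hi
        have hio : i ≠ o := fun he => hi (he ▸ pvIn_self o)
        have h4 : (pvMaintain s3 o).cnt i = s3.cnt i := by simp [pvMaintain, pvUpd, hio]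
        have h4t : (pvMaintain s3 o).todo i = s3.todo i := rfl
        have h3 := C3 i (fun hr => hi (pvIn_right hr))
        have h2 := B3 i (fun hl => hi (pvIn_left hl))
        have h1 := A5 i hi
        exact ⟨by rw [h4, h3.1, h2.1, h1.1], by rw [h4t, h3.2, h2.2, h1.2]⟩
      · have hcnt : (pvMaintain s3 o).cnt o = s3.cnt (o * 2) + s3.cnt (o * 2 + 1) := by
          simp [pvMaintain, pvUpd]
        rw [hcnt, hdec2, List.sum_append, pvCntOK_cnt hfp C2l, pvCntOK_cnt hfp C2]
      · rw [← hm]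
        exact pvCntOK_congr fuel s3 _ _ _ _ aML C2l
      · rw [← hm]
        exact pvCntOK_congr fuel s3 _ _ _ _ aMR C2

theorem pvSum_set (l : List Int) (n : Nat) (v : Int) (h : n < l.length) :
    (l.set n v).sum = l.sum - l.getD n 0 + v := by
  induction l generalizing n with
  | nil => simp at h
  | cons x xs ih =>
    cases n with
    | zero => simp; ring
    | succ n => simp only [List.set, List.sum_cons, List.getD_cons_succ,
        ih n (by simpa using h)]; ring

theorem pvFlipLoop_ok : ∀ (k a : Nat) (arr : List Int) (ones : Int),
    a + k ≤ arr.length → ones = arr.sum →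
    pvFlipLoop arr ones (List.range' a k) =
      ((arr.mapIdx fun j x => if a ≤ j ∧ j < a + k then 1 - x else x),
       (arr.mapIdx fun j x => if a ≤ j ∧ j < a + k then 1 - x else x).sum) := by
  intro k
  induction k with
  | zero =>
    intro a arr ones h1 h2
    have he : (arr.mapIdx fun j x => if a ≤ j ∧ j < a then 1 - x else x) = arr := by
      apply List.ext_getElem (by simp)
      intro j hj1 hj2
      simp only [List.getElem_mapIdx]
      rw [if_neg (by omega)]
    show (arr, ones) = _
    simp only [Nat.add_zero, he, h2]
  | succ k ih =>
    intro a arr ones h1 h2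
    have ha : a < arr.length := by omega
    have hget : arr.getD a 0 = arr[a] := List.getD_eq_getElem arr 0 ha
    rw [List.range'_succ]
    have hstep : pvFlipLoop arr ones (a :: List.range' (a + 1) k) =
        pvFlipLoop (arr.set a (1 - arr.getD a 0)) (ones + 1 - 2 * arr.getD a 0)
          (List.range' (a + 1) k) := rfl
    rw [hstep]
    have hsum : ones + 1 - 2 * arr.getD a 0 = (arr.set a (1 - arr.getD a 0)).sum := by
      rw [pvSum_set arr a _ ha, ← h2]; ring
    rw [ih (a + 1) _ _ (by simp; omega) hsum]
    have he : ((arr.set a (1 - arr.getD a 0)).mapIdx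
          fun j x => if a + 1 ≤ j ∧ j < a + 1 + k then 1 - x else x)
        = arr.mapIdx fun j x => if a ≤ j ∧ j < a + (k + 1) then 1 - x else x := by
      apply List.ext_getElem (by simp)
      intro j hj1 hj2
      simp only [List.getElem_mapIdx, List.getElem_set]
      by_cases hja : a = j
      · subst hja
        rw [if_pos rfl, if_neg (by omega), if_pos (by omega), hget]
      · rw [if_neg hja]
        by_cases hc : a + 1 ≤ j ∧ j < a + 1 + k
        · rw [if_pos hc, if_pos (by omega)]
        · rw [if_neg hc, if_neg (by omega)]
    rw [he]

theorem pvRange'_map_getD (xs : List Int) :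
    (List.range' 1 xs.length).map (fun i => xs.getD (i - 1) 0) = xs := by
  apply List.ext_getElem
  · simp
  · intro j h1 h2
    simp [List.getElem_range', List.getD_eq_getElem?_getD, List.getElem?_eq_getElem h2]

theorem pvLoop_ok : ∀ (qs : List (List Int)) (n : Nat) (ans : List Int) (s : Int)
    (st : PvSt) (arr : List Int), 1 ≤ n →
    (∀ q ∈ qs, q.length = 3 ∧
      (q.getD 0 0 = 1 → 0 ≤ q.getD 1 0 ∧ q.getD 1 0 < (n : Int) ∧
        0 ≤ q.getD 2 0 ∧ q.getD 2 0 < (n : Int))) →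
    arr.length = n →
    pvDecode (n + 1) st 1 1 n = arr →
    pvCntOK (n + 1) st 1 1 n →
    pvLoopA n qs ans s st = pvLoopB qs ans s arr.sum arr := by
  intro qs
  induction qs with
  | nil => intro n ans s st arr _ _ _ _ _; rfl
  | cons q qs ih =>
    intro n ans s st arr hn hq hlen hdec hok
    have hq0 := hq q (List.mem_cons_self)
    have hqs : ∀ q' ∈ qs, q'.length = 3 ∧
        (q'.getD 0 0 = 1 → 0 ≤ q'.getD 1 0 ∧ q'.getD 1 0 < (n : Int) ∧
          0 ≤ q'.getD 2 0 ∧ q'.getD 2 0 < (n : Int)) :=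
      fun q' hm => hq q' (List.mem_cons_of_mem _ hm)
    simp only [pvLoopA, pvLoopB]
    by_cases hop1 : q.getD 0 0 = 1
    · rw [if_pos hop1, if_pos hop1]
      obtain ⟨h1, h2, h3, h4⟩ := hq0.2 hop1
      have hupd := pvUpdate_ok (n + 1) 1 1 n ((q.getD 1 0) + 1).toNat ((q.getD 2 0) + 1).toNat st
        (le_refl 1) hn (by omega) (by omega) (by omega) hok
      have hflip := pvFlipLoop_ok ((q.getD 2 0) + 1 - (q.getD 1 0)).toNat (q.getD 1 0).toNat
        arr arr.sum (by omega) rfl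
      rw [hflip]
      have harr : (arr.mapIdx fun j x =>
            if (q.getD 1 0).toNat ≤ j ∧
               j < (q.getD 1 0).toNat + ((q.getD 2 0) + 1 - (q.getD 1 0)).toNat
            then 1 - x else x)
          = pvFlipIn 1 ((q.getD 1 0) + 1).toNat ((q.getD 2 0) + 1).toNat arr := by
        unfold pvFlipIn
        congr 1
        funext j x
        have hiff : ((q.getD 1 0).toNat ≤ j ∧
            j < (q.getD 1 0).toNat + ((q.getD 2 0) + 1 - (q.getD 1 0)).toNat) ↔
            (((q.getD 1 0) + 1).toNat ≤ 1 + j ∧ 1 + j ≤ ((q.getD 2 0) + 1).toNat) := by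
          omega
        rw [if_congr hiff rfl rfl]
      rw [harr]
      have hd2 : pvDecode (n + 1)
          (pvUpdate (n + 1) 1 1 n ((q.getD 1 0) + 1).toNat ((q.getD 2 0) + 1).toNat st) 1 1 n
          = pvFlipIn 1 ((q.getD 1 0) + 1).toNat ((q.getD 2 0) + 1).toNat arr := by
        rw [hupd.2.1, hdec]
      exact ih n ans s _ _ hn hqs (by simp [pvFlipIn, hlen]) hd2 hupd.2.2
    · rw [if_neg hop1, if_neg hop1]
      by_cases hop2 : q.getD 0 0 = 2
      · rw [if_pos hop2, if_pos hop2]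
        have hcnt : st.cnt 1 = arr.sum := by
          rw [pvCntOK_cnt (by omega) hok, hdec]
        rw [hcnt]
        exact ih n ans _ st arr hn hqs hlen hdec hok
      · rw [if_neg hop2, if_neg hop2]
        exact ih n _ s st arr hn hqs hlen hdec hok

-- ===== VERDICT (by name: the statement is the Claim_ definition above) =====
theorem handleQuery_spec : Claim_equal_handleQuery := by
  intro nums1 nums2 queries _ hpre
  unfold Spec_handleQuery handleQuery handleQuery_alt
  obtain ⟨hne, hq⟩ := hpre
  have hn : 1 ≤ nums1.length := List.length_pos_of_ne_nil hne
  have hb := pvBuild_ok nums1 (nums1.length + 1) 1 1 nums1.length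
    ⟨fun _ => 0, fun _ => false⟩ (by omega) (by omega) (by omega)
  have hd := hb.2.2 (fun _ => rfl)
  have hdec : pvDecode (nums1.length + 1)
      (pvBuild nums1 (nums1.length + 1) 1 1 nums1.length ⟨fun _ => 0, fun _ => false⟩)
      1 1 nums1.length = nums1 := by
    rw [hd.1]
    have : nums1.length - 1 + 1 = nums1.length := by omega
    rw [this, pvRange'_map_getD]
  exact pvLoop_ok queries nums1.length [] nums2.sum _ nums1 hn hq rfl hdec hd.2
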